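-- pv_equiv track=rewrite | github.com/Prodatron/sympy-tools | gfx_icon.py | bin2asm
-- ===== SOURCE A (Python) =====
-- def byt2hex(byt):
--     hexstr = hex(65536 + byt)
--     return hexstr[len(hexstr) - 2:]
--
-- def cutend(txt):
--     return txt[:len(txt) - 1]
--
-- def bin2asm(asm_bin, len_head, len_line, spc, labtxt):
--     asm_txt = labtxt + "\n"
--     adr = len_head
--     while adr < len(asm_bin):
--         if (adr - len_head) % len_line == 0:
--             asm_txt += f"{spc*' '}db "
--         asm_txt += f"#{byt2hex(asm_bin[adr])},"
--         adr += 1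
--         if (adr - len_head) % len_line == 0:
--             asm_txt = cutend(asm_txt) + "\n"
--     return asm_txt
-- ===== SOURCE B (Python) =====
-- def byt2hex(byt):
--     hexstr = hex(65536 + byt)
--     return hexstr[len(hexstr) - 2:]
--
-- def _line(chunk, len_line, spc):
--     line = spc * " " + "db " + ",".join("#" + byt2hex(b) for b in chunk)
--     return line + "\n" if len(chunk) == len_line else line + ","
--
-- def bin2asm(asm_bin, len_head, len_line, spc, labtxt):
--     data = asm_bin[len_head:]
--     parts = [labtxt + "\n"]
--     for i in range(0, len(data), len_line):
--         parts.append(_line(data[i:i + len_line], len_line, spc))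
--     return "".join(parts)
-- ===== Notes on version B (the rewrite author's own statement) =====
-- stated objective: faster
-- what changed: B replaces A's stateful while-loop (per-byte index arithmetic, append-then-cut-the-last-comma backtracking on one ever-growing string) by slicing the body off once and formatting fixed-size chunks, each line built directly with ','.join and collected in a list joined once at the end; full chunks get '\n', a partial final chunk keeps its trailing comma.
-- intended difference: For -len(asm_bin) <= len_head < 0 A's negative indexing wraps around, so it re-emits the last -len_head bytes and then formats the whole list again, while B formats exactly the last -len_head bytes (the slice asm_bin[len_head:]), which is the intended 'drop the header' meaning. — e.g. on bin2asm([10, 32], -1, 2, 1, "L"): A returns "L\n db #20,#0a\n db #20,", B returns "L\n db #20,"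
-- outside the precondition, e.g. on bin2asm([1, 2, 3, 4], 0, -2, 1, 'L'): A returns 'L\n db #01,#02\n db #03,#04\n', B returns 'L\n'
import Mathlib
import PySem

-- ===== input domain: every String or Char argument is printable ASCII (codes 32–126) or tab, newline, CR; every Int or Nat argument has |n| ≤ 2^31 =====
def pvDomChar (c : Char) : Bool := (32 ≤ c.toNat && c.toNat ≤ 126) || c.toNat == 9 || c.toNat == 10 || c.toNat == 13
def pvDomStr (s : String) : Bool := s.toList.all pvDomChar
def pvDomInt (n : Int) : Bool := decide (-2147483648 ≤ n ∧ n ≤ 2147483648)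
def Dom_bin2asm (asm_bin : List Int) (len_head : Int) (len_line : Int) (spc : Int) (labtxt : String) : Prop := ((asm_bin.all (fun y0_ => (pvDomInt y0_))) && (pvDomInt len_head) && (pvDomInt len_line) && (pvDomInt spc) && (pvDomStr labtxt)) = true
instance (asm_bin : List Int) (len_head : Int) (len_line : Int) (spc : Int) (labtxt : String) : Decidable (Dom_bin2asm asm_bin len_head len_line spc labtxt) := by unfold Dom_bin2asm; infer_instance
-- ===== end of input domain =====

-- B replaces A's stateful while-loop (append-then-cut-the-comma backtracking on one growing string) by
-- slicing the body off once and formatting fixed-size chunks with a comma-join, collected and joined once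
-- (measured faster in a timing run: A's repeated += rebuild is quadratic at scale).


-- ===== PORT A =====
-- hex(n): Python's built-in, ported by hand (no PySem primitive): lowercase hex digits, '0x'/'−0x' prefix; exact for every Int.
def pyHexChars (n : Int) : List Char :=
  if n < 0 then '-' :: '0' :: 'x' :: Nat.toDigits 16 n.natAbs
  else '0' :: 'x' :: Nat.toDigits 16 n.toNat

-- byt2hex(byt) = hex(65536 + byt)[len(..)-2:]  (strings handled on .toList per PySem convention)
def byt2hexChars (byt : Int) : List Char :=
  let hexstr := pyHexChars (65536 + byt)
  PySem.Chars.slice hexstr (some ((hexstr.length : Int) - 2)) none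

-- cutend(txt) = txt[:len(txt)-1]
def cutendChars (txt : List Char) : List Char :=
  PySem.Chars.slice txt none (some ((txt.length : Int) - 1))

-- the while-loop of A; fuel only makes the loop total (adr increases by 1 each pass)
def bin2asmLoop (asm_bin : List Int) (len_head len_line spc : Int) :
    Nat → Int → List Char → List Char
  | 0, _, asm_txt => asm_txt
  | fuel + 1, adr, asm_txt =>
    if adr < PySem.List.len asm_bin then
      match PySem.List.pyGet? asm_bin adr with
      | none => asm_txt   -- IndexError: excluded by Pre_bin2asm
      | some b =>
        let t1 := if PySem.Int.mod (adr - len_head) len_line = 0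
                  then asm_txt ++ List.replicate spc.toNat ' ' ++ ['d', 'b', ' ']
                  else asm_txt
        let t2 := t1 ++ '#' :: byt2hexChars b ++ [',']
        let adr' := adr + 1
        let t3 := if PySem.Int.mod (adr' - len_head) len_line = 0
                  then cutendChars t2 ++ ['\n']
                  else t2
        bin2asmLoop asm_bin len_head len_line spc fuel adr' t3
    else asm_txt

def bin2asm (asm_bin : List Int) (len_head : Int) (len_line : Int) (spc : Int) (labtxt : String) : String :=
  String.ofList (bin2asmLoop asm_bin len_head len_line spc
    ((PySem.List.len asm_bin - len_head).toNat) len_head (labtxt.toList ++ ['\n']))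

-- ===== PORT B =====
-- _line(chunk, len_line, spc)
def bLinePV (chunk : List Int) (len_line spc : Int) : List Char :=
  let line := List.replicate spc.toNat ' ' ++ ['d', 'b', ' '] ++
    PySem.Chars.join [','] (chunk.map (fun b => '#' :: byt2hexChars b))
  if (chunk.length : Int) = len_line then line ++ ['\n'] else line ++ [',']

-- ''.join(parts) is concatenation of the collected pieces, ported as List.flatten
def bin2asm_alt (asm_bin : List Int) (len_head : Int) (len_line : Int) (spc : Int) (labtxt : String) : String :=
  let data := PySem.List.slice asm_bin (some len_head) none
  let parts := (PySem.List.pyRange 0 (PySem.List.len data) len_line).foldl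
    (fun acc i => acc ++ [bLinePV (PySem.List.slice data (some i) (some (i + len_line))) len_line spc])
    [labtxt.toList ++ ['\n']]
  String.ofList parts.flatten

-- ===== PRECONDITION & SPEC =====
-- Pre_ excludes: len_line = 0 (A raises ZeroDivisionError once the loop runs) and len_head < -len(asm_bin)
-- (A raises IndexError); it also excludes len_line < 0, on which A returns but its Python-modulo accidentally
-- chunks by |len_line| — an artefact of A's implementation no caller would specify (B yields just the label line).
def Pre_bin2asm (asm_bin : List Int) (len_head : Int) (len_line : Int) (spc : Int) (labtxt : String) : Prop :=
  0 < len_line ∧ -(asm_bin.length : Int) ≤ len_head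
instance (asm_bin : List Int) (len_head : Int) (len_line : Int) (spc : Int) (labtxt : String) : Decidable (Pre_bin2asm asm_bin len_head len_line spc labtxt) := by unfold Pre_bin2asm; infer_instance

def pvWitness_bin2asm : List Int × Int × Int × Int × String := ([16, 32, 5], 0, 2, 1, "lab:")

-- For -len(asm_bin) ≤ len_head < 0 A's negative indexing wraps around, re-emitting the last -len_head bytes and
-- then the whole list, while B formats exactly the last -len_head bytes (the slice asm_bin[len_head:]) — the
-- intended 'drop the header' meaning.
def D_bin2asm (asm_bin : List Int) (len_head : Int) (len_line : Int) (spc : Int) (labtxt : String) : Prop :=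
  len_head < 0
instance (asm_bin : List Int) (len_head : Int) (len_line : Int) (spc : Int) (labtxt : String) : Decidable (D_bin2asm asm_bin len_head len_line spc labtxt) := by unfold D_bin2asm; infer_instance

def Spec_bin2asm (asm_bin : List Int) (len_head : Int) (len_line : Int) (spc : Int) (labtxt : String) (out : String) : Prop :=
  ¬ D_bin2asm asm_bin len_head len_line spc labtxt → out = bin2asm_alt asm_bin len_head len_line spc labtxt
instance (asm_bin : List Int) (len_head : Int) (len_line : Int) (spc : Int) (labtxt : String) (out : String) : Decidable (Spec_bin2asm asm_bin len_head len_line spc labtxt out) := by unfold Spec_bin2asm; infer_instance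

def pvDiffWitness_bin2asm : List Int × Int × Int × Int × String := ([10, 32], -1, 2, 1, "L")
def pvDiffWitnessOut_bin2asm : String × String :=
  ("L\n db #20,#0a\n db #20,", "L\n db #20,")

-- ===== CLAIM (what is proved, stated in full; the proofs are below) =====
def Claim_unchanged_bin2asm : Prop := ∀ (asm_bin : List Int) (len_head : Int) (len_line : Int) (spc : Int) (labtxt : String), Dom_bin2asm asm_bin len_head len_line spc labtxt → Pre_bin2asm asm_bin len_head len_line spc labtxt → Spec_bin2asm asm_bin len_head len_line spc labtxt (bin2asm asm_bin len_head len_line spc labtxt)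
def Claim_exact_bin2asm : Prop := ∀ (asm_bin : List Int) (len_head : Int) (len_line : Int) (spc : Int) (labtxt : String), Dom_bin2asm asm_bin len_head len_line spc labtxt → Pre_bin2asm asm_bin len_head len_line spc labtxt → D_bin2asm asm_bin len_head len_line spc labtxt → bin2asm asm_bin len_head len_line spc labtxt ≠ bin2asm_alt asm_bin len_head len_line spc labtxt
def Claim_changed_bin2asm : Prop := Dom_bin2asm (pvDiffWitness_bin2asm.1) (pvDiffWitness_bin2asm.2.1) (pvDiffWitness_bin2asm.2.2.1) (pvDiffWitness_bin2asm.2.2.2.1) (pvDiffWitness_bin2asm.2.2.2.2) ∧ Pre_bin2asm (pvDiffWitness_bin2asm.1) (pvDiffWitness_bin2asm.2.1) (pvDiffWitness_bin2asm.2.2.1) (pvDiffWitness_bin2asm.2.2.2.1) (pvDiffWitness_bin2asm.2.2.2.2) ∧ D_bin2asm (pvDiffWitness_bin2asm.1) (pvDiffWitness_bin2asm.2.1) (pvDiffWitness_bin2asm.2.2.1) (pvDiffWitness_bin2asm.2.2.2.1) (pvDiffWitness_bin2asm.2.2.2.2) ∧ bin2asm (pvDiffWitness_bin2asm.1) (pvDiffWitness_bin2asm.2.1)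 (pvDiffWitness_bin2asm.2.2.1) (pvDiffWitness_bin2asm.2.2.2.1) (pvDiffWitness_bin2asm.2.2.2.2) = pvDiffWitnessOut_bin2asm.1 ∧ bin2asm_alt (pvDiffWitness_bin2asm.1) (pvDiffWitness_bin2asm.2.1) (pvDiffWitness_bin2asm.2.2.1) (pvDiffWitness_bin2asm.2.2.2.1) (pvDiffWitness_bin2asm.2.2.2.2) = pvDiffWitnessOut_bin2asm.2 ∧ pvDiffWitnessOut_bin2asm.1 ≠ pvDiffWitnessOut_bin2asm.2
-- ===== LEMMAS AND PROOFS =====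
-- proof-side normal form: one text segment per chunk
def segPV (LN : Nat) : Nat → List Int → List Char
  | _, [] => []
  | r, b :: rest =>
    ('#' :: byt2hexChars b) ++ (if r + 1 = LN then ['\n'] else [',']) ++ segPV LN (r + 1) rest

def renderPV (LN : Nat) (spcs : List Char) (l : List Int) : List Char :=
  if h : l = [] ∨ LN = 0 then [] else
    spcs ++ ['d', 'b', ' '] ++ segPV LN 0 (l.take LN) ++ renderPV LN spcs (l.drop LN)
termination_by l.length
decreasing_by
  rcases l with _ | ⟨x, xs⟩
  · simp at h
  · simp only [List.length_drop, List.length_cons]; omega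

-- the text A's loop appends at absolute position j of the body
def piecePV (data : List Int) (LN : Nat) (spcs : List Char) (j : Nat) : List Char :=
  (if j % LN = 0 then spcs ++ ['d', 'b', ' '] else []) ++
  ('#' :: byt2hexChars (data.getD j 0)) ++
  (if (j + 1) % LN = 0 then ['\n'] else [','])

theorem cutend_concat (l : List Char) (c : Char) : cutendChars (l ++ [c]) = l := by
  simp only [cutendChars, PySem.Chars.slice_eq_listSlice]
  have hlen : ((l ++ [c]).length : Int) - 1 = ((l.length : Nat) : Int) := by
    simp
  rw [hlen, PySem.List.slice_to_natCast]
  exact List.take_left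

theorem stepA (data : List Int) (LN : Nat) (spcs : List Char) (j : Nat) (v : Int)
    (hv : data.getD j 0 = v) (txt : List Char) :
    (if (j + 1) % LN = 0
      then cutendChars ((if j % LN = 0 then txt ++ spcs ++ ['d', 'b', ' '] else txt) ++ '#' :: byt2hexChars v ++ [',']) ++ ['\n']
      else (if j % LN = 0 then txt ++ spcs ++ ['d', 'b', ' '] else txt) ++ '#' :: byt2hexChars v ++ [','])
    = txt ++ piecePV data LN spcs j := by
  have hcut : ∀ X : List Char, cutendChars (X ++ '#' :: byt2hexChars v ++ [',']) = X ++ '#' :: byt2hexChars v := by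
    intro X
    rw [show X ++ '#' :: byt2hexChars v ++ [','] = (X ++ '#' :: byt2hexChars v) ++ [','] from by simp]
    exact cutend_concat _ _
  by_cases h1 : j % LN = 0 <;> by_cases h2 : (j + 1) % LN = 0 <;>
    simp only [h1, h2, if_true, if_false, piecePV, hv, hcut, if_pos, if_neg] <;>
    simp [List.append_assoc]

theorem seg_inner (LN : Nat) (hLN : 0 < LN) (data : List Int) :
    ∀ (c r : Nat), r + c ≤ LN → r + c ≤ data.length →
    ((List.range c).map (fun t =>
        ('#' :: byt2hexChars (data.getD (r + t) 0)) ++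
        (if (r + t + 1) % LN = 0 then ['\n'] else [',']))).flatten
      = segPV LN r ((data.drop r).take c) := by
  intro c
  induction c with
  | zero => intro r _ _; simp [segPV]
  | succ c ih =>
    intro r h1 h2
    have hr : r < data.length := by omega
    have hdrop : data.drop r = data[r] :: data.drop (r + 1) :=
      List.drop_eq_getElem_cons hr
    rw [List.range_succ_eq_map]
    simp only [List.map_cons, List.map_map, List.flatten_cons]
    rw [hdrop]
    simp only [List.take_succ_cons, segPV]
    have hgetD : data.getD (r + 0) 0 = data[r] := by
      simp [List.getD, List.getElem?_eq_getElem hr]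
    rw [hgetD]
    have hsep : (if (r + 0 + 1) % LN = 0 then ['\n'] else [',']) = (if r + 1 = LN then ['\n'] else [',']) := by
      by_cases h : r + 1 = LN
      · simp [h]
      · have hlt : r + 1 < LN := by omega
        have hm : (r + 0 + 1) % LN = r + 1 := Nat.mod_eq_of_lt (by omega)
        rw [if_neg (by omega), if_neg (by omega)]
    rw [hsep]
    rw [← ih (r + 1) (by omega) (by omega)]
    have hmap : List.map ((fun t => ('#' :: byt2hexChars (data.getD (r + t) 0)) ++ (if (r + t + 1) % LN = 0 then ['\n'] else [','])) ∘ Nat.succ) (List.range c) = List.map (fun t => ('#' :: byt2hexChars (data.getD (r + 1 + t) 0)) ++ (if (r + 1 + t + 1) % LN = 0 then ['\n'] else [','])) (List.range c) := by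
      apply List.map_congr_left
      intro t _
      simp only [Function.comp_apply, Nat.succ_eq_add_one]
      simp only [show r + (t + 1) = r + 1 + t from by omega]
    rw [hmap]


theorem join_seg (LN : Nat) :
    ∀ (chunk : List Int) (r : Nat), chunk ≠ [] → r + chunk.length ≤ LN →
    PySem.Chars.join [','] (chunk.map (fun b => '#' :: byt2hexChars b)) ++
      (if r + chunk.length = LN then ['\n'] else [','])
    = segPV LN r chunk := by
  intro chunk
  induction chunk with
  | nil => intro r h _; exact absurd rfl h
  | cons b rest ih =>
    intro r _ hle
    cases rest with
    | nil =>
      simp only [List.map_cons, List.map_nil, PySem.Chars.join_singleton, segPV, List.length_cons,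
        List.length_nil, Nat.zero_add]
      simp
    | cons b2 rest2 =>
      have hne : (b2 :: rest2 : List Int) ≠ [] := by simp
      rw [List.map_cons, List.map_cons, PySem.Chars.join_cons_cons, segPV]
      have hlen : r + (b :: b2 :: rest2).length = r + 1 + (b2 :: rest2).length := by
        simp; omega
      simp only [hlen]
      rw [← ih (r + 1) hne (by simp at hle ⊢; omega)]
      rw [if_neg (show ¬ (r + 1 = LN) from by simp at hle; omega)]
      simp [List.append_assoc]


theorem pyRange_step_peel (n LN : Nat) (hLN : 0 < LN) (hn : 0 < n) :
    PySem.List.pyRange 0 (n : Int) (LN : Int)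
      = 0 :: (PySem.List.pyRange 0 ((n - LN : Nat) : Int) (LN : Int)).map (fun i => i + (LN : Int)) := by
  have hLNi : (0:Int) < (LN:Int) := by exact_mod_cast hLN
  rw [PySem.List.pyRange_of_pos 0 (n:Int) hLNi, PySem.List.pyRange_of_pos 0 ((n - LN : Nat):Int) hLNi]
  have key : ∀ (m : Nat), (if (0:Int) < (m:Int) then (((m:Int) - 0 + LN - 1) / LN).toNat else 0) = (m + LN - 1) / LN := by
    intro m
    by_cases hm : 0 < m
    · rw [if_pos (by exact_mod_cast hm)]
      have : ((m:Int) - 0 + LN - 1) = ((m + LN - 1 : Nat) : Int) := by push_cast; omega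
      rw [this, ← Int.natCast_div, Int.toNat_natCast]
    · have hm0 : m = 0 := by omega
      subst hm0
      simp [Nat.div_eq_of_lt (by omega : LN - 1 < LN)]
  rw [key, key]
  have hq : (n + LN - 1) / LN = (n - LN + LN - 1) / LN + 1 := by
    by_cases h : LN < n
    · have e2 : n - LN + LN - 1 = n - 1 := by omega
      have e1 : n + LN - 1 = (n - 1) + LN := by omega
      rw [e1, e2, Nat.add_div_right _ hLN]
    · have e1 : n - LN + LN - 1 = LN - 1 := by omega
      have e2 : (n + LN - 1) / LN = 1 := by
        apply Nat.div_eq_of_lt_le <;> omega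
      rw [e1, e2, Nat.div_eq_of_lt (by omega : LN - 1 < LN)]
  rw [hq, List.range_succ_eq_map]
  simp only [List.map_cons, List.map_map]
  congr 1
  apply List.map_congr_left
  intro t _
  simp only [Function.comp_apply]
  push_cast
  ring


theorem achunks (LN : Nat) (hLN : 0 < LN) (spcs : List Char) :
    ∀ (data : List Int),
    ((List.range data.length).map (piecePV data LN spcs)).flatten = renderPV LN spcs data := by
  intro data
  induction hn : data.length using Nat.strong_induction_on generalizing data with
  | _ n ih =>
  subst hn
  cases data with
  | nil => simp [renderPV]
  | cons x xs =>
    set d := x :: xs with hd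
    clear_value d
    have hdn : 0 < d.length := by simp [hd]
    -- c = size of the first chunk
    set c := min LN d.length with hc
    clear_value c
    have hcpos : 0 < c := by omega
    have hcLN : c ≤ LN := by omega
    have hcd : c ≤ d.length := by omega
    -- split the range at c
    have hsplit : d.length = c + (d.length - c) := by omega
    rw [renderPV]
    rw [dif_neg (by push_neg; exact ⟨by simp [hd], by omega⟩)]
    rw [hsplit, List.range_add, List.map_append, List.flatten_append]
    -- first chunk: j = 0 carries the prefix, 1..c-1 do not
    have hfirst : ((List.range c).map (piecePV d LN spcs)).flatten
        = spcs ++ ['d', 'b', ' '] ++ segPV LN 0 (d.take c) := by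
      obtain ⟨c', rfl⟩ : ∃ c', c = c' + 1 := ⟨c - 1, by omega⟩
      rw [List.range_succ_eq_map, List.map_cons, List.flatten_cons]
      have h0 : piecePV d LN spcs 0
          = spcs ++ ['d', 'b', ' '] ++ (('#' :: byt2hexChars (d.getD 0 0)) ++ (if (0 + 1) % LN = 0 then ['\n'] else [','])) := by
        simp [piecePV, Nat.zero_mod, List.append_assoc]
      have htail : (List.map (piecePV d LN spcs ∘ Nat.succ) (List.range c')).flatten
          = segPV LN 1 ((d.drop 1).take c') := by
        rw [← seg_inner LN hLN d c' 1 (by omega) (by omega)]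
        congr 1
        apply List.map_congr_left
        intro t ht
        have htc : t < c' := List.mem_range.mp ht
        simp only [Function.comp_apply, Nat.succ_eq_add_one, piecePV]
        rw [if_neg (by rw [Nat.mod_eq_of_lt (by omega)]; omega)]
        simp only [List.nil_append]
        simp only [show t + 1 = 1 + t from Nat.add_comm t 1]
      rw [h0, List.map_map, htail]
      -- reassemble segPV LN 0 (d.take (c'+1))
      have htake : d.take (c' + 1) = d.getD 0 0 :: (d.drop 1).take c' := by
        cases d with
        | nil => simp at hdn
        | cons y ys => simp [List.getD]
      rw [htake, segPV]
      have hsep : (if (0 + 1) % LN = 0 then ['\n'] else [',']) = (if 0 + 1 = LN then ['\n'] else [',']) := by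
        by_cases h1 : 0 + 1 = LN
        · simp [← h1]
        · rw [if_neg (by rw [Nat.mod_eq_of_lt (by omega)]; omega), if_neg h1]
      rw [hsep]
      simp [List.append_assoc]
    rw [hfirst]
    -- tail chunks
    by_cases hrest : d.length ≤ LN
    · have hc' : c = d.length := by omega
      have : d.length - c = 0 := by omega
      rw [this]
      have hdropnil : d.drop LN = [] := by
        apply List.drop_eq_nil_of_le; omega
      rw [hdropnil, renderPV]
      simp [hc']
      rw [List.take_of_length_le (by omega : d.length ≤ LN)]
    · have hcLN' : c = LN := by omega
      subst hcLN'
      have hshift : (List.map (fun t => piecePV d c spcs (c + t)) (List.range (d.length - c))).flatten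
          = renderPV c spcs (List.drop c d) := by
        rw [← ih (d.drop c).length (by simp only [List.length_drop]; omega) (d.drop c) rfl]
        rw [List.length_drop]
        congr 1
        apply List.map_congr_left
        intro t _
        simp only [piecePV]
        have h1 : (c + t) % c = t % c := Nat.add_mod_left c t
        have h2 : (c + t + 1) % c = (t + 1) % c := by
          rw [show c + t + 1 = (t + 1) + c from by omega, Nat.add_mod_right]
        have h3 : d.getD (c + t) 0 = (d.drop c).getD t 0 := by
          simp [List.getD, List.getElem?_drop]
        rw [h1, h2, h3]
      rw [← hshift, List.map_map]
      rfl

theorem loopGen (asm_bin : List Int) (lh : Int) (LN : Nat) (hLN : 0 < LN) (spc : Int)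
    (W : List Int)
    (hget : ∀ t : Nat, t < W.length → PySem.List.pyGet? asm_bin (lh + (t : Int)) = some (W.getD t 0))
    (hlen : (asm_bin.length : Int) = lh + W.length) :
    ∀ (m j : Nat) (txt : List Char), m + j = W.length →
    bin2asmLoop asm_bin lh (LN : Int) spc m (lh + (j : Int)) txt
      = txt ++ ((List.range m).map (fun t =>
          piecePV W LN (List.replicate spc.toNat ' ') (j + t))).flatten := by
  intro m
  induction m with
  | zero => intro j txt _; simp [bin2asmLoop]
  | succ m ihm =>
    intro j txt hm
    have hjW : j < W.length := by omega
    rw [bin2asmLoop]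
    rw [if_pos (show (lh + (j : Int) < PySem.List.len asm_bin) by
      simp only [PySem.List.len_eq, hlen]; omega)]
    rw [hget j hjW]
    simp only [show (lh + (j : Int) - lh) = ((j : Nat) : Int) from by ring,
      show (lh + (j : Int) + 1 - lh) = (((j + 1 : Nat)) : Int) from by push_cast; ring,
      PySem.Int.mod_natCast, Int.natCast_eq_zero]
    have harg : (lh + (j : Int) + 1) = (lh + ((j + 1 : Nat) : Int)) := by
      push_cast; ring
    rw [harg, ihm (j + 1) _ (by omega)]
    have hrange : ((List.range (m + 1)).map (fun t =>
          piecePV W LN (List.replicate spc.toNat ' ') (j + t))).flatten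
        = piecePV W LN (List.replicate spc.toNat ' ') j ++
          ((List.range m).map (fun t =>
            piecePV W LN (List.replicate spc.toNat ' ') (j + 1 + t))).flatten := by
      have hmap2 : List.map ((fun t => piecePV W LN (List.replicate spc.toNat ' ') (j + t)) ∘ Nat.succ) (List.range m)
          = List.map (fun t => piecePV W LN (List.replicate spc.toNat ' ') (j + 1 + t)) (List.range m) := by
        apply List.map_congr_left
        intro a _
        simp only [Function.comp_apply]
        congr 1
        omega
      rw [List.range_succ_eq_map, List.map_cons, List.flatten_cons, List.map_map, hmap2]
      simp
    rw [hrange]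
    rw [stepA W LN (List.replicate spc.toNat ' ') j (W.getD j 0) rfl txt]
    simp [List.append_assoc]

theorem bchunks (LN : Nat) (hLN : 0 < LN) (spc : Int) :
    ∀ (data : List Int),
    ((PySem.List.pyRange 0 (data.length : Int) (LN : Int)).map (fun i =>
        bLinePV (PySem.List.slice data (some i) (some (i + (LN : Int)))) (LN : Int) spc)).flatten
      = renderPV LN (List.replicate spc.toNat ' ') data := by
  have hLNi : (0 : Int) < (LN : Int) := by exact_mod_cast hLN
  intro data
  induction hn : data.length using Nat.strong_induction_on generalizing data with
  | _ n ih =>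
  subst hn
  by_cases hd0 : data = []
  · subst hd0
    rw [PySem.List.pyRange_of_pos 0 _ hLNi]
    simp [renderPV]
  · have hdn : 0 < data.length := List.length_pos_iff.mpr hd0
    rw [pyRange_step_peel data.length LN hLN hdn, List.map_cons, List.flatten_cons, List.map_map]
    have hfirst : bLinePV (PySem.List.slice data (some 0) (some (0 + (LN : Int)))) (LN : Int) spc
        = List.replicate spc.toNat ' ' ++ ['d', 'b', ' '] ++ segPV LN 0 (data.take LN) := by
      have hsl : PySem.List.slice data (some 0) (some (0 + (LN : Int))) = data.take LN := by
        rw [zero_add, PySem.List.slice_zero_start, PySem.List.slice_to_natCast]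
      rw [hsl]
      simp only [bLinePV]
      have hck : (data.take LN).length = min LN data.length := List.length_take ..
      rw [← join_seg LN (data.take LN) 0
        (by intro hc; rw [← List.length_eq_zero_iff] at hc; omega)
        (by omega)]
      by_cases hfull : LN ≤ data.length
      · rw [if_pos (by push_cast [hck]; omega), if_pos (by omega)]
        simp [List.append_assoc]
      · rw [if_neg (by push_cast [hck]; omega), if_neg (by omega)]
        simp [List.append_assoc]
    have htail : (PySem.List.pyRange 0 ((data.length - LN : Nat) : Int) (LN : Int)).map
          ((fun i => bLinePV (PySem.List.slice data (some i) (some (i + (LN : Int)))) (LN : Int) spc) ∘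
            (fun i => i + (LN : Int)))
        = (PySem.List.pyRange 0 (((data.drop LN).length : Nat) : Int) (LN : Int)).map
          (fun i => bLinePV (PySem.List.slice (data.drop LN) (some i) (some (i + (LN : Int)))) (LN : Int) spc) := by
      rw [List.length_drop]
      apply List.map_congr_left
      intro i hi
      obtain ⟨hi0, _, _⟩ := (PySem.List.mem_pyRange_iff_of_pos hLNi i).mp hi
      simp only [Function.comp_apply]
      congr 1
      rw [PySem.List.slice_toNat _ (by omega) (by omega),
          PySem.List.slice_toNat _ (by omega) (by omega),
          List.drop_drop]
      congr 1
      · omega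
      · congr 1; omega
    rw [hfirst, htail, ih (data.drop LN).length (by simp [List.length_drop]; omega) (data.drop LN) rfl]
    conv_rhs => rw [renderPV]
    rw [dif_neg (by push_neg; exact ⟨hd0, by omega⟩)]

-- number of chunk lines a body of N bytes produces (= ceil(N/LN))
def kChunksPV (LN : Nat) (N : Nat) : Nat :=
  if h : LN = 0 ∨ N = 0 then 0 else kChunksPV LN (N - LN) + 1
termination_by N
decreasing_by push_neg at h; omega

theorem pyHex_len_ge (n : Int) : 2 ≤ (pyHexChars n).length := by
  unfold pyHexChars
  split_ifs <;> simp

theorem byt2hex_len (b : Int) : (byt2hexChars b).length = 2 := by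
  have h2 := pyHex_len_ge (65536 + b)
  unfold byt2hexChars
  simp only [PySem.Chars.slice_eq_listSlice]
  have e : (((pyHexChars (65536 + b)).length : Int) - 2)
      = ((((pyHexChars (65536 + b)).length - 2 : Nat)) : Int) := by push_cast; omega
  rw [e, PySem.List.slice_from_natCast]
  simp only [List.length_drop]
  omega

theorem segPV_len (LN : Nat) : ∀ (l : List Int) (r : Nat), (segPV LN r l).length = 4 * l.length := by
  intro l
  induction l with
  | nil => intro r; simp [segPV]
  | cons b rest ih =>
    intro r
    rw [segPV]
    by_cases hr : r + 1 = LN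
    · rw [if_pos hr]
      simp only [List.length_append, List.length_cons, List.length_nil, byt2hex_len, ih (r + 1)]
      omega
    · rw [if_neg hr]
      simp only [List.length_append, List.length_cons, List.length_nil, byt2hex_len, ih (r + 1)]
      omega

theorem renderPV_len (LN : Nat) (hLN : 0 < LN) (spcs : List Char) :
    ∀ l : List Int, (renderPV LN spcs l).length
      = 4 * l.length + (spcs.length + 3) * kChunksPV LN l.length := by
  intro l
  induction hn : l.length using Nat.strong_induction_on generalizing l with
  | _ n ih =>
  subst hn
  by_cases h0 : l = []
  · subst h0; simp [renderPV, kChunksPV]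
  · have hlpos : 0 < l.length := List.length_pos_iff.mpr h0
    rw [renderPV, dif_neg (by push_neg; exact ⟨h0, by omega⟩)]
    have hK : kChunksPV LN l.length = kChunksPV LN (l.length - LN) + 1 := by
      rw [kChunksPV, dif_neg (by push_neg; omega)]
    have hrec := ih (l.drop LN).length (by simp only [List.length_drop]; omega) (l.drop LN) rfl
    rw [hK]
    simp only [List.length_append, List.length_cons, List.length_nil]
    rw [segPV_len LN (l.take LN) 0, hrec, List.length_take, List.length_drop]
    rw [Nat.mul_add, Nat.mul_one]
    omega

theorem kChunks_mono (LN : Nat) (hLN : 0 < LN) :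
    ∀ N m, m ≤ N → kChunksPV LN m ≤ kChunksPV LN N := by
  intro N
  induction N using Nat.strong_induction_on with
  | _ N ih =>
  intro m hm
  by_cases hm0 : m = 0
  · subst hm0
    have h0 : kChunksPV LN 0 = 0 := by rw [kChunksPV]; simp
    rw [h0]
    exact Nat.zero_le _
  · have e1 : kChunksPV LN m = kChunksPV LN (m - LN) + 1 := by
      rw [kChunksPV, dif_neg (by push_neg; omega)]
    have e2 : kChunksPV LN N = kChunksPV LN (N - LN) + 1 := by
      rw [kChunksPV, dif_neg (by push_neg; omega)]
    rw [e1, e2]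
    exact Nat.succ_le_succ (ih (N - LN) (by omega) (m - LN) (by omega))

-- ===== VERDICT (by name: the statement is the Claim_ definition above) =====
theorem bin2asm_spec : Claim_unchanged_bin2asm := by
  intro asm_bin len_head len_line spc labtxt _ hpre
  unfold Spec_bin2asm
  intro hnd
  unfold D_bin2asm at hnd
  obtain ⟨hll, hlh⟩ := hpre
  have hh0 : 0 ≤ len_head := by omega
  obtain ⟨h, rfl⟩ : ∃ h : Nat, len_head = (h : Int) := ⟨len_head.toNat, by omega⟩
  obtain ⟨LN, rfl⟩ : ∃ LN : Nat, len_line = (LN : Int) := ⟨len_line.toNat, by omega⟩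
  have hLN : 0 < LN := by exact_mod_cast hll
  unfold bin2asm bin2asm_alt
  have hdata : PySem.List.slice asm_bin (some (h : Int)) none = asm_bin.drop h :=
    PySem.List.slice_from_natCast ..
  by_cases hhn : h ≤ asm_bin.length
  · have hfuel : (PySem.List.len asm_bin - (h : Int)).toNat = (asm_bin.drop h).length := by
      simp only [PySem.List.len_eq, List.length_drop]; omega
    have hget : ∀ t : Nat, t < (asm_bin.drop h).length →
        PySem.List.pyGet? asm_bin ((h : Int) + (t : Int)) = some ((asm_bin.drop h).getD t 0) := by
      intro t ht
      rw [List.length_drop] at ht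
      have hlt : h + t < asm_bin.length := by omega
      rw [show ((h : Int) + (t : Int)) = (((h + t : Nat)) : Int) from by push_cast; ring,
        PySem.List.pyGet?_natCast, List.getElem?_eq_getElem hlt]
      congr 1
      simp [List.getD, List.getElem?_drop, List.getElem?_eq_getElem hlt]
    have hloop := loopGen asm_bin ((h : Int)) LN hLN spc (asm_bin.drop h) hget
      (by simp only [List.length_drop]; push_cast; omega)
      ((asm_bin.drop h).length) 0 (labtxt.toList ++ ['\n']) (by omega)
    rw [show ((h : Int) + ((0 : Nat) : Int)) = ((h : Int)) from by simp] at hloop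
    rw [hfuel, hloop]
    have hzero : ((List.range (asm_bin.drop h).length).map (fun t =>
          piecePV (asm_bin.drop h) LN (List.replicate spc.toNat ' ') (0 + t)))
        = ((List.range (asm_bin.drop h).length).map
          (piecePV (asm_bin.drop h) LN (List.replicate spc.toNat ' '))) := by
      apply List.map_congr_left; intro t _; rw [Nat.zero_add]
    rw [hzero, achunks LN hLN (List.replicate spc.toNat ' ') (asm_bin.drop h)]
    simp only [hdata, PySem.List.len_eq,
      PySem.List.foldl_append_singleton_eq_map
        (fun i => bLinePV (PySem.List.slice (asm_bin.drop h) (some i) (some (i + (LN : Int)))) (LN : Int) spc)]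
    simp only [List.flatten_append, List.flatten_cons, List.flatten_nil, List.append_nil]
    rw [bchunks LN hLN spc (asm_bin.drop h)]
  · -- header longer than the input: A's loop never runs, B's body slice is empty
    have hfuel : (PySem.List.len asm_bin - (h : Int)).toNat = 0 := by
      simp only [PySem.List.len_eq]; omega
    have hdrop : asm_bin.drop h = [] := List.drop_eq_nil_of_le (by omega)
    rw [hfuel]
    simp only [hdata, hdrop, PySem.List.len_eq, List.length_nil, Nat.cast_zero]
    rw [PySem.List.pyRange_of_pos 0 0 (by exact_mod_cast hLN)]
    simp [bin2asmLoop]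

theorem bin2asm_changed : Claim_changed_bin2asm := by
  unfold Claim_changed_bin2asm; decide

theorem bin2asm_tight : Claim_exact_bin2asm := by
  intro asm_bin len_head len_line spc labtxt _ hpre hD
  unfold D_bin2asm at hD
  unfold Pre_bin2asm at hpre
  obtain ⟨hll, hlh⟩ := hpre
  obtain ⟨k, rfl⟩ : ∃ k : Nat, len_head = -(k : Int) := ⟨(-len_head).toNat, by omega⟩
  obtain ⟨LN, rfl⟩ : ∃ LN : Nat, len_line = (LN : Int) := ⟨len_line.toNat, by omega⟩
  have hLN : 0 < LN := by exact_mod_cast hll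
  have hkpos : 0 < k := by omega
  have hkn : k ≤ asm_bin.length := by omega
  have hnpos : 0 < asm_bin.length := by omega
  unfold bin2asm bin2asm_alt
  set W := asm_bin.drop (asm_bin.length - k) ++ asm_bin with hW
  have hWlen : W.length = k + asm_bin.length := by
    simp only [hW, List.length_append, List.length_drop]; omega
  have hget : ∀ t : Nat, t < W.length →
      PySem.List.pyGet? asm_bin (-(k : Int) + (t : Int)) = some (W.getD t 0) := by
    intro t ht
    rw [hWlen] at ht
    by_cases htk : t < k
    · rw [show (-(k : Int) + (t : Int)) = -(((k - t : Nat)) : Int) from by push_cast; omega,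
        PySem.List.pyGet?_neg_natCast asm_bin (k - t) (by omega) (by omega),
        List.getElem?_eq_getElem (show asm_bin.length - (k - t) < asm_bin.length by omega)]
      have hWt : W.getD t 0 = (asm_bin.drop (asm_bin.length - k)).getD t 0 := by
        rw [hW]
        exact List.getD_append _ _ _ _ (by simp only [List.length_drop]; omega)
      rw [hWt]
      congr 1
      simp only [List.getD, List.getElem?_drop,
        List.getElem?_eq_getElem (show asm_bin.length - k + t < asm_bin.length by omega)]
      simp only [Option.getD_some]
      congr 1
      omega
    · rw [show (-(k : Int) + (t : Int)) = (((t - k : Nat)) : Int) from by push_cast; omega,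
        PySem.List.pyGet?_natCast,
        List.getElem?_eq_getElem (show t - k < asm_bin.length by omega)]
      have hWt : W.getD t 0 = asm_bin.getD (t - (asm_bin.drop (asm_bin.length - k)).length) 0 := by
        rw [hW]
        exact List.getD_append_right _ _ _ _ (by simp only [List.length_drop]; omega)
      rw [hWt]
      simp only [List.length_drop]
      congr 1
      simp only [List.getD,
        List.getElem?_eq_getElem (show t - (asm_bin.length - (asm_bin.length - k)) < asm_bin.length by omega)]
      simp only [Option.getD_some]
      congr 1
      omega
  have hA := loopGen asm_bin (-(k : Int)) LN hLN spc W hget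
    (by have := hWlen; push_cast; omega) W.length 0 (labtxt.toList ++ ['\n']) (by omega)
  rw [show (-(k : Int) + ((0 : Nat) : Int)) = (-(k : Int)) from by simp] at hA
  have hfuel : (PySem.List.len asm_bin - (-(k : Int))).toNat = W.length := by
    have := hWlen
    simp only [PySem.List.len_eq]; omega
  rw [hfuel, hA]
  have hzero : ((List.range W.length).map (fun t =>
        piecePV W LN (List.replicate spc.toNat ' ') (0 + t)))
      = ((List.range W.length).map (piecePV W LN (List.replicate spc.toNat ' '))) := by
    apply List.map_congr_left; intro t _; rw [Nat.zero_add]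
  rw [hzero, achunks LN hLN (List.replicate spc.toNat ' ') W]
  have hdata : PySem.List.slice asm_bin (some (-(k : Int))) none
      = asm_bin.drop (asm_bin.length - k) :=
    PySem.List.slice_from_neg_natCast asm_bin k hkpos
  simp only [hdata, PySem.List.len_eq,
    PySem.List.foldl_append_singleton_eq_map
      (fun i => bLinePV (PySem.List.slice (asm_bin.drop (asm_bin.length - k)) (some i) (some (i + (LN : Int)))) (LN : Int) spc)]
  simp only [List.flatten_append, List.flatten_cons, List.flatten_nil, List.append_nil]
  rw [bchunks LN hLN spc (asm_bin.drop (asm_bin.length - k))]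
  -- the two rendered bodies have different lengths: A formats k + n bytes, B only k
  intro heq
  have hlists := congrArg String.toList heq
  simp only [String.toList_ofList] at hlists
  have hlen := congrArg List.length hlists
  simp only [List.length_append] at hlen
  have hrA := renderPV_len LN hLN (List.replicate spc.toNat ' ') W
  have hrB := renderPV_len LN hLN (List.replicate spc.toNat ' ') (asm_bin.drop (asm_bin.length - k))
  rw [hrA, hrB] at hlen
  have hdl : (asm_bin.drop (asm_bin.length - k)).length = k := by
    simp only [List.length_drop]; omega
  rw [hdl, hWlen] at hlen
  have hmono := Nat.mul_le_mul_left ((List.replicate spc.toNat ' ').length + 3)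
    (kChunks_mono LN hLN (k + asm_bin.length) k (by omega))
  omega
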